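-- pv_equiv track=rewrite | github.com/YoonJunHyeok/PS | 프로그래머스/3/64064. 불량 사용자/불량 사용자.py | solution
-- ===== SOURCE A (Python) =====
-- def is_match(user_id: str, banned_id: str) -> bool:
--     if len(user_id) != len(banned_id):
--         return False
--
--     for u_char, b_char in zip(user_id, banned_id):
--         if b_char == '*':
--             continue
--
--         if u_char != b_char:
--             return False
--
--     return True
--
-- def solution(user_id, banned_id):
--     from collections import deque
--
--     num_user = len(user_id)
--     num_banned = len(banned_id)
--     banned_used = [False for _ in range(num_banned)]
--     cur_d = deque()
--     answer_s = set()
--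
--     def dfs(user_idx):
--         if user_idx == num_user:
--             if all(banned_used):
--                 answer_s.add(tuple(sorted(cur_d)))
--             return
--
--         for banned_idx in range(num_banned):
--             if banned_used[banned_idx]:
--                 continue
--
--             if is_match(user_id[user_idx], banned_id[banned_idx]):
--                 banned_used[banned_idx] = True
--                 cur_d.append(user_id[user_idx])
--                 dfs(user_idx + 1)
--                 banned_used[banned_idx] = False
--                 cur_d.pop()
--
--         dfs(user_idx + 1)
--
--         return
--
--     dfs(0)
--
--     answer = len(answer_s)
--
--     return answer
-- ===== SOURCE B (Python) =====
-- def is_match(user_id: str, banned_id: str) -> bool: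
--     if len(user_id) != len(banned_id):
--         return False
--
--     for u_char, b_char in zip(user_id, banned_id):
--         if b_char == '*':
--             continue
--
--         if u_char != b_char:
--             return False
--
--     return True
--
--
-- def solution(user_id, banned_id):
--     # For each banned pattern, precompute the matching user indices, then build
--     # the product of those choice lists (pruning repeated indices as we go) and
--     # count the distinct sorted tuples of chosen user names.
--     cands = [[i for i, u in enumerate(user_id) if is_match(u, b)] for b in banned_id]
--     partial = [()]
--     for c in cands:
--         partial = [combo + (i,) for combo in partial for i in c if i not in combo]
--     answer = {tuple(sorted(user_id[i] for i in combo)) for combo in partial}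
--     return len(answer)
-- ===== Notes on version B (the rewrite author's own statement) =====
-- stated objective: faster
-- what changed: A enumerates every injective partial assignment by recursing over users and trying each unused banned pattern (an O((B+1)^U) DFS with a shared mutable mask); B precomputes, per banned pattern, the list of matching user indices and walks the Cartesian product of those candidate lists (pruning repeated indices as it goes), collecting the distinct sorted name tuples.
import Mathlib
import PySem

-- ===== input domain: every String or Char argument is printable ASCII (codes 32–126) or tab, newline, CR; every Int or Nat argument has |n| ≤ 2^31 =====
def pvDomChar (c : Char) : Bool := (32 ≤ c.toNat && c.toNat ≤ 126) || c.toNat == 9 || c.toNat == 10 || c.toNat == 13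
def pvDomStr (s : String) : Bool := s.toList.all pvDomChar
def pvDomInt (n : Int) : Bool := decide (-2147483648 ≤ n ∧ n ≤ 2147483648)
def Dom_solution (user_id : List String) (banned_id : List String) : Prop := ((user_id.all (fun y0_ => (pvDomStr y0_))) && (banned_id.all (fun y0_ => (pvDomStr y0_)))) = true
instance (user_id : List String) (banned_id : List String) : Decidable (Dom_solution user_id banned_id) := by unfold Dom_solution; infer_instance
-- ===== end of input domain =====

-- B replaces A's exponential user-by-user DFS over pattern masks by a per-pattern
-- candidate precomputation and a pruned product over the patterns; same return value.

-- ===== PORT A =====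

-- helper is_match: length check, then char-by-char loop with early return
def matchLoop : List (Char × Char) → Bool
  | [] => true
  | (u, b) :: rest => if b = '*' then matchLoop rest else if u ≠ b then false else matchLoop rest

def is_match (user_id : String) (banned_id : String) : Bool :=
  if PySem.Str.len user_id ≠ PySem.Str.len banned_id then false
  else matchLoop (user_id.toList.zip banned_id.toList)

mutual
-- dfs(user_idx): state (banned_used, cur_d, answer_s) threaded explicitly;
-- `rest` is user_id[user_idx:], so the head is user_id[user_idx].
def dfsA (banned : List String) (rest : List String) (used : List Bool)
    (cur : List String) (ans : PySem.Set (List String)) : PySem.Set (List String) :=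
  match rest with
  | [] =>
      if used.all (fun x => x) then PySem.Set.add ans (PySem.List.sorted cur (fun s => s) false)
      else ans
  | u :: rest' => dfsA banned rest' used cur (dfsLoopA banned u rest' used cur (List.range banned.length) ans)
termination_by (rest.length, 1, 0)

-- the `for banned_idx in range(num_banned)` loop inside dfs
def dfsLoopA (banned : List String) (u : String) (rest : List String) (used : List Bool)
    (cur : List String) (js : List Nat) (ans : PySem.Set (List String)) : PySem.Set (List String) :=
  match js with
  | [] => ans
  | j :: js' =>
      dfsLoopA banned u rest used cur js'
        (if used.getD j false then ans
         else if is_match u (banned.getD j "") then dfsA banned rest (used.set j true) (cur ++ [u]) ans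
         else ans)
termination_by (rest.length + 1, 0, js.length)
end

def solution (user_id : List String) (banned_id : List String) : Int :=
  PySem.Set.len (dfsA banned_id user_id (List.replicate banned_id.length false) [] PySem.Set.empty)

-- ===== PORT B =====

-- [i for i, u in enumerate(user_id) if is_match(u, b)]
def candsOf (user_id : List String) (b : String) : List Int :=
  (PySem.List.enumerate user_id).filterMap (fun p => if is_match p.2 b then some p.1 else none)

-- partial = [combo + (i,) for combo in partial for i in c if i not in combo]
def extendCombos (part : List (List Int)) (c : List Int) : List (List Int) :=
  part.flatMap (fun combo => (c.filter (fun i => !combo.contains i)).map (fun i => combo ++ [i]))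

def solution_alt (user_id : List String) (banned_id : List String) : Int :=
  let cands := banned_id.map (fun b => candsOf user_id b)
  let part := cands.foldl extendCombos [[]]
  let answer : PySem.Set (List String) :=
    PySem.Set.ofList (part.map (fun combo =>
      PySem.List.sorted (combo.map (fun i => PySem.List.pyGetD user_id i "")) (fun s => s) false))
  PySem.Set.len answer

-- ===== PRECONDITION & SPEC =====
def Spec_solution (user_id : List String) (banned_id : List String) (out : Int) : Prop := out = solution_alt user_id banned_id
instance (user_id : List String) (banned_id : List String) (out : Int) : Decidable (Spec_solution user_id banned_id out) := by unfold Spec_solution; infer_instance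

-- ===== CLAIM (what is proved, stated in full; the proofs are below) =====
def Claim_equal_solution : Prop := ∀ (user_id : List String) (banned_id : List String), Dom_solution user_id banned_id → Spec_solution user_id banned_id (solution user_id banned_id)

-- ===== LEMMAS AND PROOFS =====

-- the patterns at the not-yet-used positions, in order (missing mask entries count as unused)
def maskOut : List String → List Bool → List String
  | [], _ => []
  | b :: bs, [] => b :: maskOut bs []
  | b :: bs, m :: ms => if m then maskOut bs ms else b :: maskOut bs ms

-- `combo` chooses, for each pattern of `bs` in order, a distinct matching index into `user`
def Good (user : List String) (bs : List String) (combo : List Int) : Prop :=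
  List.Forall₂ (fun i b => i ∈ candsOf user b) combo bs ∧ combo.Nodup

def getR (rest : List String) (i : Int) : String := PySem.List.pyGetD rest i ""

def sortS (l : List String) : List String := PySem.List.sorted l (fun s => s) false

lemma mem_candsOf {user : List String} {b : String} {i : Int} :
    i ∈ candsOf user b ↔ ∃ (k : ℕ) (_ : k < user.length), i = (k : ℤ) ∧ is_match user[k] b = true := by
  simp only [candsOf, List.mem_filterMap, PySem.List.mem_enumerate_iff]
  constructor
  · rintro ⟨⟨pi, pu⟩, ⟨k, hk, heq⟩, hp⟩
    injection heq with h1 h2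
    subst h1; subst h2
    cases hm : is_match user[k] b
    · simp [hm] at hp
    · simp only [hm, if_true, Option.some.injEq] at hp
      exact ⟨k, hk, by omega, hm⟩
  · rintro ⟨k, hk, rfl, hm⟩
    exact ⟨((k : ℤ), user[k]), ⟨k, hk, by simp⟩, by simp [hm]⟩

lemma candsOf_nil (b : String) : candsOf [] b = [] := rfl

lemma candsOf_nonneg {user : List String} {b : String} {i : Int} (h : i ∈ candsOf user b) : 0 ≤ i := by
  obtain ⟨k, hk, rfl, -⟩ := mem_candsOf.1 h
  positivity

lemma mem_candsOf_cons {u : String} {rest : List String} {b : String} {i : Int} :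
    i ∈ candsOf (u :: rest) b ↔ (i = 0 ∧ is_match u b = true) ∨ ∃ i', i' ∈ candsOf rest b ∧ i = i' + 1 := by
  simp only [mem_candsOf]
  constructor
  · rintro ⟨k, hk, rfl, hm⟩
    cases k with
    | zero => exact Or.inl ⟨by simp, by simpa using hm⟩
    | succ k' =>
        refine Or.inr ⟨(k' : ℤ), ⟨k', by simpa using hk, rfl, by simpa using hm⟩, by push_cast; ring⟩
  · rintro (⟨rfl, hm⟩ | ⟨i', ⟨k, hk, rfl, hm⟩, rfl⟩)
    · exact ⟨0, by simp, by simp, by simpa using hm⟩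
    · exact ⟨k + 1, by simpa using hk, by push_cast; ring, by simpa using hm⟩

lemma all_iff_maskOut_nil {banned : List String} :
    ∀ {used : List Bool}, used.length = banned.length →
      (used.all (fun x => x) = true ↔ maskOut banned used = []) := by
  induction banned with
  | nil =>
      intro used hlen
      rw [List.length_eq_zero_iff.1 hlen]
      simp [maskOut]
  | cons b bs ih =>
      intro used hlen
      match used with
      | m :: ms =>
        cases m
        · simp [maskOut]
        · simpa [maskOut] using ih (by simpa using hlen)

lemma maskOut_replicate (banned : List String) :
    maskOut banned (List.replicate banned.length false) = banned := by
  induction banned with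
  | nil => rfl
  | cons b bs ih => simpa [maskOut, List.replicate_succ] using ih

lemma maskOut_set {banned : List String} :
    ∀ {used : List Bool} {j : ℕ}, used.length = banned.length → j < used.length →
      used.getD j false = false →
      ∃ l₁ l₂, maskOut banned used = l₁ ++ banned.getD j "" :: l₂ ∧
        maskOut banned (used.set j true) = l₁ ++ l₂ := by
  induction banned with
  | nil => intro used j hlen hj hu; rw [List.length_eq_zero_iff.1 hlen] at hj; simp at hj
  | cons b bs ih =>
      intro used j hlen hj hu
      match used with
      | m :: ms =>
        cases j with
        | zero =>
            simp only [List.getD_cons_zero] at hu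
            subst hu
            exact ⟨[], maskOut bs ms, by simp [maskOut], by simp [maskOut]⟩
        | succ j' =>
            obtain ⟨l₁, l₂, h1, h2⟩ := ih (used := ms) (j := j') (by simpa using hlen)
              (by simpa using hj) (by simpa using hu)
            cases m
            · exact ⟨b :: l₁, l₂, by simp [maskOut, h1], by simp [maskOut, h2]⟩
            · exact ⟨l₁, l₂, by simp [maskOut, h1], by simp [maskOut, h2]⟩

lemma maskOut_split {banned : List String} :
    ∀ {used : List Bool} {l₁ l₂ : List String} {p : String},
      used.length = banned.length → maskOut banned used = l₁ ++ p :: l₂ →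
      ∃ j, j < used.length ∧ used.getD j false = false ∧ banned.getD j "" = p ∧
        maskOut banned (used.set j true) = l₁ ++ l₂ := by
  induction banned with
  | nil =>
      intro used l₁ l₂ p hlen h
      rw [List.length_eq_zero_iff.1 hlen] at h
      simp [maskOut] at h
  | cons b bs ih =>
      intro used l₁ l₂ p hlen h
      match used with
      | m :: ms =>
        cases m
        · rw [show maskOut (b :: bs) (false :: ms) = b :: maskOut bs ms from by simp [maskOut]] at h
          match l₁, h with
          | [], h =>
              injection h with h1 h2
              exact ⟨0, by simp, by simp, by simpa using h1, by simpa [maskOut] using h2⟩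
          | q :: l₁', h =>
              injection h with h1 h2
              obtain ⟨j, hj, hu, hp, hm⟩ := ih (used := ms) (by simpa using hlen) h2
              exact ⟨j + 1, by simpa using hj, by simpa using hu, by simpa using hp,
                by simp [maskOut, hm, h1]⟩
        · rw [show maskOut (b :: bs) (true :: ms) = maskOut bs ms from by simp [maskOut]] at h
          obtain ⟨j, hj, hu, hp, hm⟩ := ih (used := ms) (by simpa using hlen) h
          exact ⟨j + 1, by simpa using hj, by simpa using hu, by simpa using hp,
            by simp [maskOut, hm]⟩

lemma mem_left_of_forall₂ {α β : Type} {R : α → β → Prop} {l₁ : List α} {l₂ : List β} {a : α}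
    (h : List.Forall₂ R l₁ l₂) (ha : a ∈ l₁) : ∃ b ∈ l₂, R a b := by
  induction h with
  | nil => cases ha
  | cons hr _ ih =>
      rcases List.mem_cons.1 ha with rfl | ha'
      · exact ⟨_, List.mem_cons_self .., hr⟩
      · obtain ⟨b, hb, hab⟩ := ih ha'
        exact ⟨b, List.mem_cons_of_mem _ hb, hab⟩

lemma good_shift {u : String} {rest : List String} {bs : List String} {combo : List Int}
    (h : List.Forall₂ (fun i b => i ∈ candsOf (u :: rest) b) combo bs) (h0 : (0 : ℤ) ∉ combo) :
    ∃ c, List.Forall₂ (fun i b => i ∈ candsOf rest b) c bs ∧ combo = c.map (· + 1) := by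
  revert h0
  induction h with
  | nil => exact fun _ => ⟨[], List.Forall₂.nil, rfl⟩
  | @cons i bb l₁ l₂ hr hrest ih =>
      intro h0
      obtain ⟨c, hc, rfl⟩ := ih (fun hm => h0 (List.mem_cons_of_mem _ hm))
      rcases mem_candsOf_cons.1 hr with ⟨rfl, -⟩ | ⟨i', hi', rfl⟩
      · exact absurd (List.mem_cons_self ..) h0
      · exact ⟨i' :: c, List.Forall₂.cons hi' hc, by simp⟩

lemma good_unshift {u : String} {rest : List String} {bs : List String} {c : List Int}
    (h : List.Forall₂ (fun i b => i ∈ candsOf rest b) c bs) :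
    List.Forall₂ (fun i b => i ∈ candsOf (u :: rest) b) (c.map (· + 1)) bs := by
  induction h with
  | nil => exact List.Forall₂.nil
  | @cons i bb l₁ l₂ hr hrest ih =>
      exact List.Forall₂.cons (mem_candsOf_cons.2 (Or.inr ⟨i, hr, rfl⟩)) ih

lemma map_getR_shift {u : String} {rest : List String} {c : List Int}
    (h : ∀ i ∈ c, 0 ≤ i) : (c.map (· + 1)).map (getR (u :: rest)) = c.map (getR rest) := by
  induction c with
  | nil => rfl
  | cons i c ih =>
      have hi : 0 ≤ i := h i (List.mem_cons_self ..)
      obtain ⟨k, rfl⟩ := Int.eq_ofNat_of_zero_le hi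
      have hstep : getR (u :: rest) ((k : ℤ) + 1) = getR rest (k : ℤ) := by
        unfold getR
        rw [show ((k : ℤ) + 1) = ((k + 1 : ℕ) : ℤ) by push_cast; ring,
          PySem.List.pyGetD_natCast, PySem.List.pyGetD_natCast]
        rfl
      simpa [hstep] using ih (fun i hi => h i (List.mem_cons_of_mem _ hi))

lemma forall₂_nonneg {user : List String} {bs : List String} {combo : List Int}
    (hf : List.Forall₂ (fun i b => i ∈ candsOf user b) combo bs) : ∀ i ∈ combo, 0 ≤ i :=
  fun i hi => by
    obtain ⟨b, -, hb⟩ := mem_left_of_forall₂ hf hi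
    exact candsOf_nonneg hb

lemma getR_zero {u : String} {rest : List String} : getR (u :: rest) 0 = u := by
  unfold getR
  rw [show (0 : ℤ) = ((0 : ℕ) : ℤ) from rfl, PySem.List.pyGetD_natCast]
  rfl

lemma sortS_perm {l l' : List String} (h : l.Perm l') : sortS l = sortS l' :=
  PySem.List.sorted_eq_sorted_of_perm _ _ _ (fun _ _ h => h) h

lemma nodup_mid {c₁ c₂ : List ℤ} (h : (c₁ ++ c₂).Nodup) (h₁ : ∀ i ∈ c₁, 0 ≤ i) (h₂ : ∀ i ∈ c₂, 0 ≤ i) :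
    (c₁.map (· + 1) ++ 0 :: c₂.map (· + 1)).Nodup := by
  have hmap : ((c₁ ++ c₂).map (· + 1)).Nodup := h.map (fun a b hab => by omega)
  rw [List.map_append, List.nodup_append] at hmap
  obtain ⟨ha, hb, hd⟩ := hmap
  rw [List.nodup_append]
  refine ⟨ha, ?_, ?_⟩
  · rw [List.nodup_cons]
    refine ⟨fun hm => ?_, hb⟩
    obtain ⟨i, hi, he⟩ := List.mem_map.1 hm
    have := h₂ i hi; omega
  · intro a hac b hbc
    rcases List.mem_cons.1 hbc with rfl | hbc'
    · obtain ⟨i, hi, rfl⟩ := List.mem_map.1 hac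
      have := h₁ i hi; omega
    · exact hd a hac b hbc'

lemma forall₂_append_cons_left {α β : Type} {R : α → β → Prop} {c₁ c₂ : List α} {a : α} {l : List β}
    (h : List.Forall₂ R (c₁ ++ a :: c₂) l) :
    ∃ l₁ p l₂, l = l₁ ++ p :: l₂ ∧ List.Forall₂ R c₁ l₁ ∧ R a p ∧ List.Forall₂ R c₂ l₂ := by
  induction c₁ generalizing l with
  | nil =>
      cases h with
      | cons hr hrest => exact ⟨[], _, _, rfl, List.Forall₂.nil, hr, hrest⟩
  | cons x c₁' ih =>
      cases h with
      | cons hr hrest =>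
          obtain ⟨l₁, p, l₂, rfl, hf₁, hp, hf₂⟩ := ih hrest
          exact ⟨_ :: l₁, p, l₂, rfl, List.Forall₂.cons hr hf₁, hp, hf₂⟩

-- the crux: one step of A's recursion (assign u to some unused pattern, or skip u)
-- corresponds exactly to extending a choice over the remaining patterns by index 0 / shifting
lemma crux {banned : List String} {u : String} {rest : List String} {used : List Bool}
    {cur : List String} {x : List String} (hlen : used.length = banned.length) :
    ((∃ combo, Good rest (maskOut banned used) combo ∧ x = sortS (cur ++ combo.map (getR rest))) ∨
     (∃ j, j < banned.length ∧ used.getD j false = false ∧ is_match u (banned.getD j "") = true ∧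
        ∃ c, Good rest (maskOut banned (used.set j true)) c ∧ x = sortS (cur ++ u :: c.map (getR rest))))
    ↔ ∃ combo, Good (u :: rest) (maskOut banned used) combo ∧ x = sortS (cur ++ combo.map (getR (u :: rest))) := by
  constructor
  · rintro (⟨combo', ⟨hf, hnd⟩, hx⟩ | ⟨j, hj, hu, hm, c, ⟨hf, hnd⟩, hx⟩)
    · refine ⟨combo'.map (· + 1), ⟨good_unshift hf, hnd.map (fun a b hab => by omega)⟩, ?_⟩
      rw [map_getR_shift (forall₂_nonneg hf)]
      exact hx
    · obtain ⟨l₁, l₂, hm1, hm2⟩ := maskOut_set hlen (by omega) hu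
      rw [hm2] at hf
      have hc12 : c = c.take l₁.length ++ c.drop l₁.length := (List.take_append_drop ..).symm
      have hf₁ := List.forall₂_take_append _ _ _ hf
      have hf₂ := List.forall₂_drop_append _ _ _ hf
      have hn₁ : ∀ i ∈ c.take l₁.length, 0 ≤ i := forall₂_nonneg hf₁
      have hn₂ : ∀ i ∈ c.drop l₁.length, 0 ≤ i := forall₂_nonneg hf₂
      refine ⟨(c.take l₁.length).map (· + 1) ++ 0 :: (c.drop l₁.length).map (· + 1), ⟨?_, ?_⟩, ?_⟩
      · rw [hm1]
        exact List.rel_append (good_unshift hf₁)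
          (List.Forall₂.cons (mem_candsOf_cons.2 (Or.inl ⟨rfl, hm⟩)) (good_unshift hf₂))
      · exact nodup_mid (hc12 ▸ hnd) hn₁ hn₂
      · calc x = sortS (cur ++ u :: ((c.take l₁.length).map (getR rest) ++ (c.drop l₁.length).map (getR rest))) := by
              rw [hx, ← List.map_append, ← hc12]
          _ = sortS (cur ++ ((c.take l₁.length).map (getR rest) ++ u :: (c.drop l₁.length).map (getR rest))) :=
              sortS_perm (List.Perm.append_left _ List.perm_middle.symm)
          _ = _ := by
              rw [List.map_append, List.map_cons, map_getR_shift hn₁, map_getR_shift hn₂, getR_zero]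
  · rintro ⟨combo, ⟨hf, hnd⟩, hx⟩
    by_cases h0 : (0 : ℤ) ∈ combo
    · obtain ⟨c₁, c₂, rfl⟩ := List.append_of_mem h0
      obtain ⟨l₁, p, l₂, hmask, hf₁, hp0, hf₂⟩ := forall₂_append_cons_left hf
      obtain ⟨j, hj, hu, hpj, hms⟩ := maskOut_split hlen hmask
      have hnd' := hnd
      rw [List.nodup_append, List.nodup_cons] at hnd'
      have h01 : (0 : ℤ) ∉ c₁ := fun hmem => hnd'.2.2 0 hmem 0 (List.mem_cons_self ..) rfl
      have h02 : (0 : ℤ) ∉ c₂ := hnd'.2.1.1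
      obtain ⟨d₁, hd₁, hc₁⟩ := good_shift hf₁ h01
      obtain ⟨d₂, hd₂, hc₂⟩ := good_shift hf₂ h02
      subst hc₁; subst hc₂
      have hmatch : is_match u p = true := by
        rcases mem_candsOf_cons.1 hp0 with ⟨-, hmu⟩ | ⟨i', hi', habs⟩
        · exact hmu
        · have := candsOf_nonneg hi'; omega
      refine Or.inr ⟨j, by omega, hu, by rw [hpj]; exact hmatch, d₁ ++ d₂, ⟨?_, ?_⟩, ?_⟩
      · rw [hms]
        exact List.rel_append hd₁ hd₂
      · have hsub : (d₁.map (· + 1) ++ d₂.map (· + 1)).Sublist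
            (d₁.map (· + 1) ++ (0 : ℤ) :: d₂.map (· + 1)) :=
          (List.sublist_cons_self ..).append_left _
        have : ((d₁ ++ d₂).map (· + 1)).Nodup := by
          rw [List.map_append]
          exact hnd.sublist hsub
        exact this.of_map
      · calc x = sortS (cur ++ ((d₁.map (· + 1)).map (getR (u :: rest)) ++
                getR (u :: rest) 0 :: (d₂.map (· + 1)).map (getR (u :: rest)))) := by
              rw [hx, List.map_append, List.map_cons]
          _ = sortS (cur ++ (d₁.map (getR rest) ++ u :: d₂.map (getR rest))) := by
              rw [map_getR_shift (forall₂_nonneg hd₁), map_getR_shift (forall₂_nonneg hd₂), getR_zero]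
          _ = sortS (cur ++ u :: (d₁ ++ d₂).map (getR rest)) := by
              rw [List.map_append]
              exact sortS_perm (List.Perm.append_left _ List.perm_middle)
    · obtain ⟨c, hc, rfl⟩ := good_shift hf h0
      refine Or.inl ⟨c, ⟨hc, hnd.of_map⟩, ?_⟩
      rw [map_getR_shift (forall₂_nonneg hc)] at hx
      exact hx

lemma dfsA_nil {banned : List String} {used : List Bool} {cur : List String} {ans : PySem.Set (List String)} :
    dfsA banned [] used cur ans =
      if used.all (fun x => x) then PySem.Set.add ans (PySem.List.sorted cur (fun s => s) false) else ans := by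
  rw [dfsA]

lemma dfsA_cons {banned : List String} {u : String} {rest : List String} {used : List Bool}
    {cur : List String} {ans : PySem.Set (List String)} :
    dfsA banned (u :: rest) used cur ans =
      dfsA banned rest used cur (dfsLoopA banned u rest used cur (List.range banned.length) ans) := by
  rw [dfsA]

lemma dfsLoopA_nil {banned : List String} {u : String} {rest : List String} {used : List Bool}
    {cur : List String} {ans : PySem.Set (List String)} :
    dfsLoopA banned u rest used cur [] ans = ans := by
  rw [dfsLoopA]

lemma dfsLoopA_cons {banned : List String} {u : String} {rest : List String} {used : List Bool}
    {cur : List String} {j : Nat} {js : List Nat} {ans : PySem.Set (List String)} :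
    dfsLoopA banned u rest used cur (j :: js) ans =
      dfsLoopA banned u rest used cur js
        (if used.getD j false then ans
         else if is_match u (banned.getD j "") then dfsA banned rest (used.set j true) (cur ++ [u]) ans
         else ans) := by
  rw [dfsLoopA]

lemma dfsLoopA_mem {banned : List String} {u : String} {rest : List String}
    (hA : ∀ (used : List Bool) (cur : List String) (ans : PySem.Set (List String)) (x : List String),
      used.length = banned.length →
      (x ∈ dfsA banned rest used cur ans ↔ x ∈ ans ∨
        ∃ combo, Good rest (maskOut banned used) combo ∧ x = sortS (cur ++ combo.map (getR rest)))) :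
    ∀ (js : List Nat) (used : List Bool) (cur : List String) (ans : PySem.Set (List String)) (x : List String),
      used.length = banned.length → (∀ j ∈ js, j < banned.length) →
      (x ∈ dfsLoopA banned u rest used cur js ans ↔ x ∈ ans ∨
        ∃ j ∈ js, used.getD j false = false ∧ is_match u (banned.getD j "") = true ∧
          ∃ c, Good rest (maskOut banned (used.set j true)) c ∧ x = sortS (cur ++ u :: c.map (getR rest))) := by
  intro js
  induction js with
  | nil =>
      intro used cur ans x hlen hjs
      rw [dfsLoopA_nil]
      simp
  | cons j js ih =>
      intro used cur ans x hlen hjs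
      rw [dfsLoopA_cons,
        ih used cur _ x hlen (fun j' hj' => hjs j' (List.mem_cons_of_mem _ hj')),
        List.exists_mem_cons_iff]
      cases hu : used.getD j false with
      | true => simp
      | false =>
        cases hm : is_match u (banned.getD j "") with
        | false => simp
        | true =>
            simp only [Bool.false_eq_true, if_false, if_true]
            rw [hA (used.set j true) (cur ++ [u]) ans x (by simpa using hlen)]
            simp only [List.append_assoc, List.singleton_append, true_and]
            exact or_assoc

lemma dfsA_mem {banned : List String} :
    ∀ (rest : List String) (used : List Bool) (cur : List String) (ans : PySem.Set (List String)) (x : List String),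
      used.length = banned.length →
      (x ∈ dfsA banned rest used cur ans ↔ x ∈ ans ∨
        ∃ combo, Good rest (maskOut banned used) combo ∧ x = sortS (cur ++ combo.map (getR rest))) := by
  intro rest
  induction rest with
  | nil =>
      intro used cur ans x hlen
      rw [dfsA_nil]
      by_cases hall : used.all (fun x => x) = true
      · rw [if_pos hall, PySem.Set.mem_add, (all_iff_maskOut_nil hlen).1 hall]
        constructor
        · rintro (h | h)
          · exact Or.inl h
          · exact Or.inr ⟨[], ⟨List.Forall₂.nil, List.nodup_nil⟩, by simpa [sortS] using h⟩
        · rintro (h | ⟨combo, ⟨hf, -⟩, hx⟩)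
          · exact Or.inl h
          · cases hf
            exact Or.inr (by simpa [sortS] using hx)
      · rw [if_neg hall]
        constructor
        · exact Or.inl
        · rintro (h | ⟨combo, ⟨hf, -⟩, hx⟩)
          · exact h
          · exfalso
            rcases hmm : maskOut banned used with _ | ⟨p, ms⟩
            · exact hall ((all_iff_maskOut_nil hlen).2 hmm)
            · rw [hmm] at hf
              cases hf with
              | cons hr _ => rw [candsOf_nil] at hr; cases hr
  | cons u rest' ih =>
      intro used cur ans x hlen
      rw [dfsA_cons, ih used cur _ x hlen,
        dfsLoopA_mem (fun used cur ans x h => ih used cur ans x h) (List.range banned.length)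
          used cur ans x hlen (fun j hj => List.mem_range.1 hj)]
      have hcrux := crux (banned := banned) (u := u) (rest := rest') (used := used)
        (cur := cur) (x := x) hlen
      simp only [List.mem_range]
      rw [← hcrux]
      constructor
      · rintro ((h | h) | h)
        exacts [Or.inl h, Or.inr (Or.inr h), Or.inr (Or.inl h)]
      · rintro (h | (h | h))
        exacts [Or.inl (Or.inl h), Or.inr h, Or.inl (Or.inr h)]

lemma dfsLoopA_nodup {banned : List String} {u : String} {rest : List String}
    (hA : ∀ (used : List Bool) (cur : List String) (ans : PySem.Set (List String)),
      ans.Nodup → (dfsA banned rest used cur ans).Nodup) :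
    ∀ (js : List Nat) (used : List Bool) (cur : List String) (ans : PySem.Set (List String)),
      ans.Nodup → (dfsLoopA banned u rest used cur js ans).Nodup := by
  intro js
  induction js with
  | nil => intro used cur ans hans; rw [dfsLoopA_nil]; exact hans
  | cons j js ih =>
      intro used cur ans hans
      rw [dfsLoopA_cons]
      apply ih
      by_cases h1 : used.getD j false = true
      · rw [if_pos h1]; exact hans
      · rw [if_neg h1]
        by_cases h2 : is_match u (banned.getD j "") = true
        · rw [if_pos h2]; exact hA _ _ _ hans
        · rw [if_neg h2]; exact hans

lemma dfsA_nodup {banned : List String} :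
    ∀ (rest : List String) (used : List Bool) (cur : List String) (ans : PySem.Set (List String)),
      ans.Nodup → (dfsA banned rest used cur ans).Nodup := by
  intro rest
  induction rest with
  | nil =>
      intro used cur ans hans
      rw [dfsA_nil]
      split
      · exact PySem.Set.nodup_add _ _ hans
      · exact hans
  | cons u rest' ih =>
      intro used cur ans hans
      rw [dfsA_cons]
      exact ih _ _ _ (dfsLoopA_nodup (fun used cur ans h => ih used cur ans h) _ _ _ _ hans)

lemma mem_extendCombos {part : List (List Int)} {c : List Int} {combo : List Int} :
    combo ∈ extendCombos part c ↔ ∃ p ∈ part, ∃ i ∈ c, i ∉ p ∧ combo = p ++ [i] := by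
  simp only [extendCombos, List.mem_flatMap, List.mem_map, List.mem_filter]
  constructor
  · rintro ⟨p, hp, i, ⟨hic, hni⟩, rfl⟩
    exact ⟨p, hp, i, hic, by simpa using hni, rfl⟩
  · rintro ⟨p, hp, i, hic, hni, rfl⟩
    exact ⟨p, hp, i, ⟨hic, by simpa using hni⟩, rfl⟩

lemma mem_foldl_extendCombos {cs : List (List Int)} {combo : List Int} :
    combo ∈ cs.foldl extendCombos [[]] ↔
      List.Forall₂ (fun i c => i ∈ c) combo cs ∧ combo.Nodup := by
  induction cs using List.reverseRecOn generalizing combo with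
  | nil =>
      simp only [List.foldl_nil, List.mem_singleton, List.forall₂_nil_right_iff]
      constructor
      · rintro rfl; exact ⟨rfl, List.nodup_nil⟩
      · rintro ⟨rfl, -⟩; rfl
  | append_singleton cs c ih =>
      rw [List.foldl_append, List.foldl_cons, List.foldl_nil, mem_extendCombos]
      constructor
      · rintro ⟨p, hp, i, hi, hni, rfl⟩
        obtain ⟨hf, hnd⟩ := ih.1 hp
        refine ⟨List.rel_append hf (List.Forall₂.cons hi List.Forall₂.nil), ?_⟩
        rw [List.nodup_append]
        exact ⟨hnd, List.nodup_singleton _, fun a ha b hb => by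
          rw [List.mem_singleton] at hb
          subst hb
          exact fun he => hni (he ▸ ha)⟩
      · rintro ⟨hf, hnd⟩
        have h₁ := List.forall₂_take_append _ _ _ hf
        have h₂ := List.forall₂_drop_append _ _ _ hf
        obtain ⟨i, hi, hdrop⟩ : ∃ i, i ∈ c ∧ combo.drop cs.length = [i] := by
          cases hd2 : combo.drop cs.length with
          | nil => rw [hd2] at h₂; cases h₂
          | cons a t =>
              rw [hd2] at h₂
              cases h₂ with
              | cons hR htail =>
                  cases htail
                  exact ⟨a, hR, rfl⟩
        have hcombo : combo = combo.take cs.length ++ [i] := by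
          rw [← hdrop, List.take_append_drop]
        have hnd2 := hcombo ▸ hnd
        rw [List.nodup_append] at hnd2
        refine ⟨combo.take cs.length, ih.mpr ⟨h₁, hnd2.1⟩, i, hi, ?_, hcombo⟩
        intro hmem
        exact hnd2.2.2 i hmem i (List.mem_singleton.2 rfl) rfl

-- ===== VERDICT (by name: the statement is the Claim_ definition above) =====
theorem solution_spec : Claim_equal_solution := by
  intro user banned _
  unfold Spec_solution solution solution_alt
  have hperm : (dfsA banned user (List.replicate banned.length false) [] PySem.Set.empty).Perm
      (PySem.Set.ofList (((banned.map (fun b => candsOf user b)).foldl extendCombos [[]]).map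
        (fun combo => PySem.List.sorted (combo.map (fun i => PySem.List.pyGetD user i "")) (fun s => s) false))) := by
    rw [List.perm_ext_iff_of_nodup
      (dfsA_nodup _ _ _ _ (show (PySem.Set.empty : PySem.Set (List String)).Nodup from List.nodup_nil))
      (PySem.Set.nodup_ofList _)]
    intro x
    rw [dfsA_mem user _ [] _ x (by simp), PySem.Set.mem_ofList, maskOut_replicate]
    simp only [List.mem_map]
    constructor
    · rintro (h | ⟨combo, hg, hx⟩)
      · cases h
      · refine ⟨combo, ?_, ?_⟩
        · rw [mem_foldl_extendCombos]
          exact ⟨List.forall₂_map_right_iff.mpr hg.1, hg.2⟩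
        · rw [hx]
          simp only [List.nil_append]
          rfl
    · rintro ⟨combo, hcombo, hx⟩
      rw [mem_foldl_extendCombos] at hcombo
      refine Or.inr ⟨combo, ⟨List.forall₂_map_right_iff.mp hcombo.1, hcombo.2⟩, ?_⟩
      rw [← hx]
      simp only [List.nil_append]
      rfl
  simp only [PySem.Set.len]
  exact_mod_cast congrArg (fun n : ℕ => (n : ℤ)) hperm.length_eq
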